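-- pv_equiv track=rewrite | github.com/azzr1234/cs440 | mp2/geometry.py | isArmWithinWindow
-- ===== SOURCE A (Python) =====
-- def isArmWithinWindow(armPos, window):
--     """Determine whether the given arm stays in the window
--
--         Args:
--             armPos (list): start and end positions of all arm links [(start, end)]
--             window (tuple): (width, height) of the window
--
--         Return:
--             True if all parts are in the window. False if not.
--     """
--     width=window[0]
--     height=window[1]
--     for arm in armPos:#arm ((x,y),(x,y))
--         arm_x1=arm[0][0]
--         arm_y1=arm[0][1]
--         arm_x2=arm[1][0]
--         arm_y2=arm[1][1]
--         if arm_x1>width or arm_x1<0 or arm_y1>height or arm_y1<0 or arm_x2>width or arm_x2<0 or arm_y2>height or arm_y2<0: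
--             return False
--     return True
-- ===== SOURCE B (Python) =====
-- def isArmWithinWindow(armPos, window):
--     if not armPos:
--         return True
--     xs = [c for arm in armPos for c in (arm[0][0], arm[1][0])]
--     ys = [c for arm in armPos for c in (arm[0][1], arm[1][1])]
--     return min(xs) >= 0 and max(xs) <= window[0] and min(ys) >= 0 and max(ys) <= window[1]
-- ===== Notes on version B (the rewrite author's own statement) =====
-- stated objective: alternative
-- what changed: Replaces the early-return per-segment scan with a bounding-box reduction: collect all x and y coordinates, then compare their min/max against [0,width] and [0,height].
import Mathlib
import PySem

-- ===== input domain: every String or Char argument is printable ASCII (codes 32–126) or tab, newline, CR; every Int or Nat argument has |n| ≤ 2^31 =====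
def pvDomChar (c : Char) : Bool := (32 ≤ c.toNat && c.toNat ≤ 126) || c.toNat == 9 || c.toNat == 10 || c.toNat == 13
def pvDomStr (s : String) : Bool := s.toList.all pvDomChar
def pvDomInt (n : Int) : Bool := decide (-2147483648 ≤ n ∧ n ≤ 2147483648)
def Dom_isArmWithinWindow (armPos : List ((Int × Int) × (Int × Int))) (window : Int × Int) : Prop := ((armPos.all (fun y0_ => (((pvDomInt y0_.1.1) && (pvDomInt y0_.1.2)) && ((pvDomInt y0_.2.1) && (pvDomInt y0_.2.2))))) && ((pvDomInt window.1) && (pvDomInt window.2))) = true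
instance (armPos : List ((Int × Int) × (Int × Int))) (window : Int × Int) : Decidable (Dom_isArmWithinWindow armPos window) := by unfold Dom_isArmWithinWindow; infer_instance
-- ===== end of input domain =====

-- B replaces A's early-return per-segment scan by a bounding-box reduction (min/max of all
-- coordinates compared against the window); objective: alternative decomposition, same cost.

-- ===== PORT A =====
-- the for-loop with early 'return False' becomes structural recursion over armPos
def isArmA_go (width height : Int) : List ((Int × Int) × (Int × Int)) → Bool
  | [] => true
  | arm :: rest =>
    let arm_x1 := arm.1.1
    let arm_y1 := arm.1.2
    let arm_x2 := arm.2.1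
    let arm_y2 := arm.2.2
    if arm_x1 > width ∨ arm_x1 < 0 ∨ arm_y1 > height ∨ arm_y1 < 0 ∨
       arm_x2 > width ∨ arm_x2 < 0 ∨ arm_y2 > height ∨ arm_y2 < 0 then
      false
    else
      isArmA_go width height rest

def isArmWithinWindow (armPos : List ((Int × Int) × (Int × Int))) (window : Int × Int) : Bool :=
  let width := window.1
  let height := window.2
  isArmA_go width height armPos

-- ===== PORT B =====
-- Python's min/max over a nonempty int list (Source B only calls them on nonempty lists)
def pyMinList (h : Int) (t : List Int) : Int := t.foldl min h
def pyMaxList (h : Int) (t : List Int) : Int := t.foldl max h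

def isArmWithinWindow_alt (armPos : List ((Int × Int) × (Int × Int))) (window : Int × Int) : Bool :=
  match armPos with
  | [] => true
  | a :: rest =>
    let xs := (a :: rest).flatMap (fun arm => [arm.1.1, arm.2.1])
    let ys := (a :: rest).flatMap (fun arm => [arm.1.2, arm.2.2])
    decide (pyMinList a.1.1 xs.tail ≥ 0 ∧ pyMaxList a.1.1 xs.tail ≤ window.1 ∧
            pyMinList a.1.2 ys.tail ≥ 0 ∧ pyMaxList a.1.2 ys.tail ≤ window.2)

-- ===== PRECONDITION & SPEC =====
def Spec_isArmWithinWindow (armPos : List ((Int × Int) × (Int × Int))) (window : Int × Int) (out : Bool) : Prop := out = isArmWithinWindow_alt armPos window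
instance (armPos : List ((Int × Int) × (Int × Int))) (window : Int × Int) (out : Bool) : Decidable (Spec_isArmWithinWindow armPos window out) := by unfold Spec_isArmWithinWindow; infer_instance

-- ===== CLAIM (what is proved, stated in full; the proofs are below) =====
def Claim_equal_isArmWithinWindow : Prop := ∀ (armPos : List ((Int × Int) × (Int × Int))) (window : Int × Int), Dom_isArmWithinWindow armPos window → Spec_isArmWithinWindow armPos window (isArmWithinWindow armPos window)

-- ===== LEMMAS AND PROOFS =====

theorem foldl_min_ge (t : List Int) (d c : Int) :
    c ≤ t.foldl min d ↔ c ≤ d ∧ ∀ x ∈ t, c ≤ x := by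
  induction t generalizing d with
  | nil => simp
  | cons h t ih =>
    simp only [List.foldl_cons, ih, le_min_iff, List.mem_cons]
    constructor
    · rintro ⟨⟨h1, h2⟩, h3⟩
      refine ⟨h1, fun x hx => ?_⟩
      rcases hx with rfl | hx
      · exact h2
      · exact h3 x hx
    · rintro ⟨h1, h2⟩
      exact ⟨⟨h1, h2 h (Or.inl rfl)⟩, fun x hx => h2 x (Or.inr hx)⟩

theorem foldl_max_le (t : List Int) (d c : Int) :
    t.foldl max d ≤ c ↔ d ≤ c ∧ ∀ x ∈ t, x ≤ c := by
  induction t generalizing d with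
  | nil => simp
  | cons h t ih =>
    simp only [List.foldl_cons, ih, max_le_iff, List.mem_cons]
    constructor
    · rintro ⟨⟨h1, h2⟩, h3⟩
      refine ⟨h1, fun x hx => ?_⟩
      rcases hx with rfl | hx
      · exact h2
      · exact h3 x hx
    · rintro ⟨h1, h2⟩
      exact ⟨⟨h1, h2 h (Or.inl rfl)⟩, fun x hx => h2 x (Or.inr hx)⟩

-- B over a nonempty list equals "every coordinate of every arm is in the box"
theorem alt_eq_all (a : (Int × Int) × (Int × Int)) (rest : List ((Int × Int) × (Int × Int)))
    (w h : Int) :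
    isArmWithinWindow_alt (a :: rest) (w, h) =
      (a :: rest).all (fun arm => decide (0 ≤ arm.1.1 ∧ arm.1.1 ≤ w ∧ 0 ≤ arm.1.2 ∧
        arm.1.2 ≤ h ∧ 0 ≤ arm.2.1 ∧ arm.2.1 ≤ w ∧ 0 ≤ arm.2.2 ∧ arm.2.2 ≤ h)) := by
  rw [Bool.eq_iff_iff]
  simp only [isArmWithinWindow_alt, pyMinList, pyMaxList, List.flatMap_cons, List.cons_append,
    List.tail_cons, decide_eq_true_eq, List.all_eq_true, foldl_min_ge, foldl_max_le,
    ge_iff_le, List.mem_cons, List.mem_append, List.mem_flatMap, List.not_mem_nil,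
    false_or, or_false]
  constructor
  · rintro ⟨⟨hx1, hxall⟩, ⟨hx1', hxall'⟩, ⟨hy1, hyall⟩, ⟨hy1', hyall'⟩⟩
    rintro arm (rfl | hm)
    · exact ⟨hx1, hx1', hy1, hy1',
        hxall _ (Or.inl rfl), hxall' _ (Or.inl rfl), hyall _ (Or.inl rfl), hyall' _ (Or.inl rfl)⟩
    · exact ⟨hxall _ (Or.inr ⟨arm, hm, Or.inl rfl⟩), hxall' _ (Or.inr ⟨arm, hm, Or.inl rfl⟩),
        hyall _ (Or.inr ⟨arm, hm, Or.inl rfl⟩), hyall' _ (Or.inr ⟨arm, hm, Or.inl rfl⟩),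
        hxall _ (Or.inr ⟨arm, hm, Or.inr rfl⟩), hxall' _ (Or.inr ⟨arm, hm, Or.inr rfl⟩),
        hyall _ (Or.inr ⟨arm, hm, Or.inr rfl⟩), hyall' _ (Or.inr ⟨arm, hm, Or.inr rfl⟩)⟩
  · intro hall
    obtain ⟨ha1, ha2, ha3, ha4, ha5, ha6, ha7, ha8⟩ := hall a (Or.inl rfl)
    refine ⟨⟨ha1, ?_⟩, ⟨ha2, ?_⟩, ⟨ha3, ?_⟩, ⟨ha4, ?_⟩⟩ <;>
        rintro x (rfl | ⟨arm, hm, rfl | rfl⟩) <;>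
      first
        | exact ha5 | exact ha6 | exact ha7 | exact ha8
        | exact (hall arm (Or.inr hm)).1
        | exact (hall arm (Or.inr hm)).2.1
        | exact (hall arm (Or.inr hm)).2.2.1
        | exact (hall arm (Or.inr hm)).2.2.2.1
        | exact (hall arm (Or.inr hm)).2.2.2.2.1
        | exact (hall arm (Or.inr hm)).2.2.2.2.2.1
        | exact (hall arm (Or.inr hm)).2.2.2.2.2.2.1
        | exact (hall arm (Or.inr hm)).2.2.2.2.2.2.2

-- A equals the same "all arms in the box" predicate
theorem a_eq_all (l : List ((Int × Int) × (Int × Int))) (w h : Int) :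
    isArmA_go w h l =
      l.all (fun arm => decide (0 ≤ arm.1.1 ∧ arm.1.1 ≤ w ∧ 0 ≤ arm.1.2 ∧
        arm.1.2 ≤ h ∧ 0 ≤ arm.2.1 ∧ arm.2.1 ≤ w ∧ 0 ≤ arm.2.2 ∧ arm.2.2 ≤ h)) := by
  induction l with
  | nil => rfl
  | cons a t ih =>
    simp only [isArmA_go, List.all_cons, ih]
    split_ifs with hc
    · have : ¬ (0 ≤ a.1.1 ∧ a.1.1 ≤ w ∧ 0 ≤ a.1.2 ∧ a.1.2 ≤ h ∧
          0 ≤ a.2.1 ∧ a.2.1 ≤ w ∧ 0 ≤ a.2.2 ∧ a.2.2 ≤ h) := by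
        intro hgood; rcases hc with hc|hc|hc|hc|hc|hc|hc|hc <;> omega
      simp [this]
    · have : (0 ≤ a.1.1 ∧ a.1.1 ≤ w ∧ 0 ≤ a.1.2 ∧ a.1.2 ≤ h ∧
          0 ≤ a.2.1 ∧ a.2.1 ≤ w ∧ 0 ≤ a.2.2 ∧ a.2.2 ≤ h) := by
        omega
      simp [this]

-- ===== VERDICT (by name: the statement is the Claim_ definition above) =====
theorem isArmWithinWindow_spec : Claim_equal_isArmWithinWindow := by
  intro armPos window _
  unfold Spec_isArmWithinWindow isArmWithinWindow
  cases armPos with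
  | nil => rfl
  | cons a rest =>
    obtain ⟨w, h⟩ := window
    rw [alt_eq_all, a_eq_all]
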